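-- pv_equiv track=rewrite | github.com/XKimYXRe/TP_JavaScript | hello.py | analyser_phrase
-- ===== SOURCE A (Python) =====
-- def analyser_phrase(phrase):
--     longueur = 0
--     nombre_mots = 0
--     nombre_voyelles = 0
--     voyelles = "aeiouAEIOU"
--
--
--     dans_mot = False
--
--     for char in phrase:
--         longueur += 1
--
--         if char in voyelles:
--             nombre_voyelles += 1
--
--         if char == ' ':
--             if dans_mot:
--                 nombre_mots += 1
--                 dans_mot = False
--         else:
--             dans_mot = True
--
--         if char == '.':
--             if dans_mot:
--                 nombre_mots += 1
--             break
--
--     return longueur, nombre_mots, nombre_voyelles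
-- ===== SOURCE B (Python) =====
-- def analyser_phrase(phrase):
--     # Truncate at the first '.' (kept), then three independent passes.
--     head, sep, _tail = phrase.partition('.')
--     prefix = head + sep
--     longueur = len(prefix)
--     nombre_voyelles = sum(1 for c in prefix if c in "aeiouAEIOU")
--     nombre_mots = sum(1 for a, b in zip(prefix, prefix[1:])
--                       if b == ' ' and a != ' ')
--     if sep:
--         nombre_mots += 1
--     return longueur, nombre_mots, nombre_voyelles
-- ===== Notes on version B (the rewrite author's own statement) =====
-- stated objective: alternative
-- what changed: A's single fused stateful scan (length/vowel/word counters plus a dans_mot flag, with an early break at '.') is replaced by truncating the string at the first period via str.partition and then computing the three results in independent passes: len(prefix), a vowel comprehension, and a word count over adjacent-character pairs zip(prefix, prefix[1:]) plus one if a period was found.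
import Mathlib
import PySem

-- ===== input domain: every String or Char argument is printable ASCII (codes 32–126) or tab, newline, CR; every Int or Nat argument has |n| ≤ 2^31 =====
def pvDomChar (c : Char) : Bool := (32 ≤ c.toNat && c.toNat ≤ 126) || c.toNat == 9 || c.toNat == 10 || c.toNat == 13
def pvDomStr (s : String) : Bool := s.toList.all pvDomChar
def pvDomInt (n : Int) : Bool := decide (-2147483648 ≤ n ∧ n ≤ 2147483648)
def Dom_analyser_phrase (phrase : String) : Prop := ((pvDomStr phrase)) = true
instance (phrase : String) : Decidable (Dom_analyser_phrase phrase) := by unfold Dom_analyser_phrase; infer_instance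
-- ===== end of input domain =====

-- B replaces A's single fused stateful scan by truncate-at-first-period then three independent passes (alternative decomposition, same cost).

-- ===== PORT A =====
-- A's for-loop with early break: structural recursion over the characters carrying
-- (longueur, nombre_mots, nombre_voyelles, dans_mot). 'char in voyelles' for a
-- single char is membership in the vowel characters.
def pvALoop : List Char → Int → Int → Int → Bool → Int × Int × Int
  | [], longueur, nombre_mots, nombre_voyelles, _ => (longueur, nombre_mots, nombre_voyelles)
  | c :: rest, longueur, nombre_mots, nombre_voyelles, dans_mot =>
    let longueur := longueur + 1
    let nombre_voyelles := if "aeiouAEIOU".toList.contains c then nombre_voyelles + 1 else nombre_voyelles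
    let p : Int × Bool :=
      if c = ' ' then (if dans_mot then (nombre_mots + 1, false) else (nombre_mots, dans_mot))
      else (nombre_mots, true)
    if c = '.' then (longueur, (if p.2 then p.1 + 1 else p.1), nombre_voyelles)
    else pvALoop rest longueur p.1 nombre_voyelles p.2

def analyser_phrase (phrase : String) : Int × Int × Int :=
  pvALoop phrase.toList 0 0 0 false

-- ===== PORT B =====
-- phrase.partition('.') : characters before the first '.', and whether a '.' occurred
-- (sep is '.' iff found; the tail is discarded by Source B). Hand-ported (exact on all inputs).
def pvPartitionDot : List Char → List Char × Bool
  | [] => ([], false)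
  | c :: rest =>
    if c = '.' then ([], true)
    else
      let (h, f) := pvPartitionDot rest
      (c :: h, f)

-- sum(1 for c in prefix if c in "aeiouAEIOU")
def pvVCount : List Char → Int
  | [] => 0
  | c :: rest => (if "aeiouAEIOU".toList.contains c then 1 else 0) + pvVCount rest

-- sum(1 for a, b in zip(prefix, prefix[1:]) if b == ' ' and a != ' ')
def pvWCount : List (Char × Char) → Int
  | [] => 0
  | (a, b) :: rest => (if b = ' ' ∧ a ≠ ' ' then 1 else 0) + pvWCount rest

def analyser_phrase_alt (phrase : String) : Int × Int × Int :=
  let (head, sep) := pvPartitionDot phrase.toList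
  let pfx := head ++ (if sep then ['.'] else [])   -- prefix = head + sep
  let longueur : Int := pfx.length                 -- len(prefix)
  let nombre_voyelles := pvVCount pfx
  let nombre_mots := pvWCount (pfx.zip (pfx.drop 1))  -- prefix[1:] = drop 1
  let nombre_mots := if sep then nombre_mots + 1 else nombre_mots
  (longueur, nombre_mots, nombre_voyelles)

-- ===== PRECONDITION & SPEC =====
def Spec_analyser_phrase (phrase : String) (out : Int × Int × Int) : Prop := out = analyser_phrase_alt phrase
instance (phrase : String) (out : Int × Int × Int) : Decidable (Spec_analyser_phrase phrase out) := by unfold Spec_analyser_phrase; infer_instance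

-- ===== CLAIM (what is proved, stated in full; the proofs are below) =====
def Claim_equal_analyser_phrase : Prop := ∀ (phrase : String), Dom_analyser_phrase phrase → Spec_analyser_phrase phrase (analyser_phrase phrase)

-- ===== LEMMAS AND PROOFS =====

-- A's word count from a given dans_mot state, read off A's loop.
def pvWcnt (dm : Bool) : List Char → Int
  | [] => 0
  | c :: rest =>
    if c = '.' then 1
    else if c = ' ' then (if dm then 1 else 0) + pvWcnt false rest
    else pvWcnt true rest

-- the truncated prefix, as B builds it
def pvPrefix (cs : List Char) : List Char :=
  (pvPartitionDot cs).1 ++ (if (pvPartitionDot cs).2 then ['.'] else [])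

lemma pvALoop_inv : ∀ (cs : List Char) (l0 m0 v0 : Int) (dm : Bool),
    pvALoop cs l0 m0 v0 dm =
      (l0 + ((pvPrefix cs).length : Int), m0 + pvWcnt dm cs, v0 + pvVCount (pvPrefix cs)) := by
  intro cs
  induction cs with
  | nil => intro l0 m0 v0 dm; simp [pvALoop, pvPrefix, pvPartitionDot, pvVCount, pvWcnt]
  | cons c rest ih =>
    intro l0 m0 v0 dm
    by_cases hd : c = '.'
    · subst hd
      simp [pvALoop, pvPrefix, pvPartitionDot, pvVCount, pvWcnt]
    · by_cases hs : c = ' '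
      · subst hs
        cases dm <;> simp [pvALoop, pvPrefix, pvPartitionDot, pvWcnt, pvVCount, ih] <;>
          split_ifs <;> and_intros <;> ring
      · simp [pvALoop, pvPrefix, pvPartitionDot, pvWcnt, pvVCount, hd, hs, ih] <;>
          split_ifs <;> and_intros <;> ring

-- boundary-pair count from a known previous character
def pvWPairs (dm : Bool) : List Char → Int
  | [] => 0
  | c :: rest => (if c = ' ' ∧ dm = true then 1 else 0) + pvWPairs (decide (c ≠ ' ')) rest

lemma pvWcnt_eq_pairs : ∀ (cs : List Char) (dm : Bool),
    pvWcnt dm cs = pvWPairs dm (pvPrefix cs) + (if (pvPartitionDot cs).2 then 1 else 0) := by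
  intro cs
  induction cs with
  | nil => intro dm; simp [pvWcnt, pvPrefix, pvPartitionDot, pvWPairs]
  | cons c rest ih =>
    intro dm
    by_cases hd : c = '.'
    · subst hd; simp [pvWcnt, pvPrefix, pvPartitionDot, pvWPairs]
    · by_cases hs : c = ' '
      · subst hs
        simp [pvWcnt, pvPrefix, pvPartitionDot, pvWPairs, hd, ih]
        ring
      · simp [pvWcnt, pvPrefix, pvPartitionDot, pvWPairs, hd, hs, ih]

lemma pvWPairs_zip : ∀ (p : List Char) (a : Char),
    pvWPairs (decide (a ≠ ' ')) p = pvWCount ((a :: p).zip p) := by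
  intro p
  induction p with
  | nil => intro a; simp [pvWPairs, pvWCount]
  | cons c r ih =>
    intro a
    simp only [pvWPairs, pvWCount, List.zip_cons_cons, ih c]
    by_cases ha : a = ' ' <;> by_cases hc : c = ' ' <;> simp [ha, hc]

lemma pvWPairs_false (p : List Char) :
    pvWPairs false p = pvWCount (p.zip (p.drop 1)) := by
  cases p with
  | nil => simp [pvWPairs, pvWCount]
  | cons c r =>
    simp only [pvWPairs, List.drop_one, List.tail_cons]
    rw [← pvWPairs_zip r c]
    simp

-- ===== VERDICT (by name: the statement is the Claim_ definition above) =====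
theorem analyser_phrase_spec : Claim_equal_analyser_phrase := by
  intro phrase _
  unfold Spec_analyser_phrase analyser_phrase analyser_phrase_alt
  rw [pvALoop_inv, pvWcnt_eq_pairs, pvWPairs_false]
  rcases hpd : pvPartitionDot phrase.toList with ⟨h, f⟩
  simp only [pvPrefix, hpd, List.drop_one]
  cases f <;> simp [add_comm]
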